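-- pv_equiv track=rewrite | github.com/MaxwellMasaitis/Steinhaus-Graph-Research | steinhausTriangleGenerator.py | steinhausGenerator
-- ===== SOURCE A (Python) =====
-- def steinhausGenerator(string):
--     """
--     Creates strings as if the diagonal string were the top string, and collects them in mainList.
--     """
--     mainList = [string]
--     stringSize = len(string)
--     while stringSize > 1:
--         nextList = []
--         for i in range(len(string) - 1):
--             if string[i] == string[i + 1]:
--                 nextList.append("0")
--             else:
--                 nextList.append("1")
--         nextString = "".join(nextList)
--         mainList.append(nextString)
--         string = nextString
--         stringSize -= 1
--
--     """
--     "Diagonalizes" the list of strings, and collects them in trueList.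
--     """
--     count = 0
--     trueList = []
--     while count < len(mainList[0]):
--         newString = ""
--         for string in range(len(mainList) - count):
--             newString += mainList[string][count]
--         trueList.append(newString)
--         count += 1
--
--     """
--     Returns the diagonalized strings as a square-ified string of 1s,0s, and *s as appropriate.
--     """
--     squareString = ""
--     for string in range(len(trueList)):
--         trueList[string] = (("*" * (len(trueList) - len(trueList[string]))) + "*") + trueList[string]
--         squareString = squareString + trueList[string] + "\n"
--     # Consider adding the *** line to the trueList, since it may help keep things readable for a claw checker?
--     squareString = squareString + "*" + "*" * len(trueList)
--     return squareString
-- ===== SOURCE B (Python) =====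
-- def steinhausGenerator(string):
--     # Scatter-based rewrite: rows are generated and immediately distributed
--     # into per-diagonal buffers, fusing row generation and diagonalization.
--     n = len(string)
--     lines = [''] * n
--     row = string
--     while True:
--         for c, ch in enumerate(row):
--             lines[c] += ch
--         if len(row) <= 1:
--             break
--         row = ''.join('0' if a == b else '1' for a, b in zip(row, row[1:]))
--     return ''.join('*' * (c + 1) + lines[c] + '\n' for c in range(n)) + '*' * (n + 1)
-- ===== Notes on version B (the rewrite author's own statement) =====
-- stated objective: faster
-- what changed: Fuses row generation and diagonalization into one scatter pass that appends each produced row's characters into per-diagonal buffers joined once at the end, replacing A's materialize-all-rows-then-gather-columns structure whose gather phase builds each diagonal by repeated string concatenation (quadratic per diagonal).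
import Mathlib
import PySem

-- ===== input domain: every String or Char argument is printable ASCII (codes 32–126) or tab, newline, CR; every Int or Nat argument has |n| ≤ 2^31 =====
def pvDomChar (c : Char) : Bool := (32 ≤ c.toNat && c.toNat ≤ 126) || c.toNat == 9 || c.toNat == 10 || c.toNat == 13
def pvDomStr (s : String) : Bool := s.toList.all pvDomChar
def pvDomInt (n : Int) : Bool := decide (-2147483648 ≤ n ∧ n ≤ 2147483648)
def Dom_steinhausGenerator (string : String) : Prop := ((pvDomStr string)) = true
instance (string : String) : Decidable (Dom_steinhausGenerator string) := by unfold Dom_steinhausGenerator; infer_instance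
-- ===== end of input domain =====

-- B fuses row generation and diagonalization into one scatter pass over per-diagonal
-- buffers instead of A's materialize-all-rows-then-gather-columns two-phase structure.

-- ===== PORT A =====
-- inner for-loop building nextList by appends, then joined (we stay on List Char)
def nextRowA (s : List Char) : List Char :=
  (List.range (s.length - 1)).foldl
    (fun nextList i =>
      if s.getD i ' ' = s.getD (i + 1) ' ' then nextList ++ ['0'] else nextList ++ ['1']) []

-- the 'while stringSize > 1' loop collecting successive rows into mainList
def mainLoopA (string : List Char) (stringSize : Nat) : List (List Char) :=
  if 1 < stringSize then
    let nextString := nextRowA string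
    nextString :: mainLoopA nextString (stringSize - 1)
  else []
termination_by stringSize

-- Note on the third phase: A mutates trueList[i] just before appending it to squareString,
-- and later iterations never read mutated slots (and len(trueList) is unchanged), so the
-- fold below reading the original trueList values is exact.
def steinhausGenerator (string : String) : String :=
  let s := string.toList
  let mainList := s :: mainLoopA s s.length
  let trueList := (List.range (mainList.headD []).length).map (fun count =>
    (List.range (mainList.length - count)).foldl
      (fun newString i => newString ++ [(mainList.getD i []).getD count ' ']) [])
  let squareString := (List.range trueList.length).foldl
    (fun acc i =>
      acc ++ (List.replicate (trueList.length - (trueList.getD i []).length) '*' ++ ['*']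
              ++ trueList.getD i []) ++ ['\n']) []
  String.ofList (squareString ++ ['*'] ++ List.replicate trueList.length '*')

-- ===== PORT B =====
-- ''.join('0' if a == b else '1' for a, b in zip(row, row[1:]))
def nextRowB (row : List Char) : List Char :=
  (row.zip (row.drop 1)).map (fun p => if p.1 = p.2 then '0' else '1')

-- for c, ch in enumerate(row): lines[c] += ch
def scatterB (lines : List (List Char)) (row : List Char) : List (List Char) :=
  row.zipIdx.foldl (fun ls p => ls.set p.2 (ls.getD p.2 [] ++ [p.1])) lines

-- the 'while True: scatter; if len(row) <= 1: break; row = …' loop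
def loopB (lines : List (List Char)) (row : List Char) : List (List Char) :=
  let lines' := scatterB lines row
  if row.length ≤ 1 then lines'
  else loopB lines' (nextRowB row)
termination_by row.length
decreasing_by simp [nextRowB]; omega

def steinhausGenerator_alt (string : String) : String :=
  let s := string.toList
  let n := s.length
  let lines := loopB (List.replicate n []) s
  String.ofList
    ((((List.range n).map
        (fun c => List.replicate (c + 1) '*' ++ lines.getD c [] ++ ['\n'])).flatten)
      ++ List.replicate (n + 1) '*')

-- ===== PRECONDITION & SPEC =====
def Spec_steinhausGenerator (string : String) (out : String) : Prop := out = steinhausGenerator_alt string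
instance (string : String) (out : String) : Decidable (Spec_steinhausGenerator string out) := by unfold Spec_steinhausGenerator; infer_instance

-- ===== CLAIM (what is proved, stated in full; the proofs are below) =====
def Claim_equal_steinhausGenerator : Prop := ∀ (string : String), Dom_steinhausGenerator string → Spec_steinhausGenerator string (steinhausGenerator string)

-- ===== LEMMAS AND PROOFS =====

theorem nextRowA_eq_map (s : List Char) :
    nextRowA s = (List.range (s.length - 1)).map
      (fun i => if s.getD i ' ' = s.getD (i + 1) ' ' then '0' else '1') := by
  unfold nextRowA
  rw [show (fun (nextList : List Char) i =>
      if s.getD i ' ' = s.getD (i + 1) ' ' then nextList ++ ['0'] else nextList ++ ['1'])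
    = (fun nextList i => nextList ++ [if s.getD i ' ' = s.getD (i + 1) ' ' then '0' else '1'])
    from by funext a b; split <;> rfl]
  exact PySem.List.foldl_append_singleton_eq_map _ _ _

theorem length_nextRowA (s : List Char) : (nextRowA s).length = s.length - 1 := by
  simp [nextRowA_eq_map]

theorem nextRowB_eq (s : List Char) : nextRowB s = nextRowA s := by
  rw [nextRowA_eq_map]
  apply List.ext_getElem
  · simp [nextRowB]
  · intro i h1 h2
    simp only [nextRowB, List.getElem_map, List.getElem_zip, List.getElem_drop,
      List.getElem_range]
    have hi : i < s.length - 1 := by simpa using h2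
    rw [List.getD_eq_getElem s ' ' (by omega : i < s.length),
        List.getD_eq_getElem s ' ' (by omega : i + 1 < s.length)]
    simp [Nat.add_comm]

-- reference: the sequence of rows A and B both generate
def rowsF (s : List Char) : List (List Char) :=
  if s.length ≤ 1 then [s] else s :: rowsF (nextRowA s)
termination_by s.length
decreasing_by simp [length_nextRowA]; omega

theorem rowsA_eq (s : List Char) : s :: mainLoopA s s.length = rowsF s := by
  induction s using rowsF.induct with
  | case1 s h =>
    rw [rowsF, if_pos h, mainLoopA, if_neg (by omega)]
  | case2 s h ih =>
    rw [rowsF, if_neg h, mainLoopA, if_pos (by omega)]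
    simp only [List.cons.injEq, true_and]
    rw [show s.length - 1 = (nextRowA s).length from (length_nextRowA s).symm]
    exact ih

theorem loopB_eq (s : List Char) (lines : List (List Char)) :
    loopB lines s = (rowsF s).foldl scatterB lines := by
  induction s using rowsF.induct generalizing lines with
  | case1 s h =>
    rw [rowsF, if_pos h, loopB]
    simp [h]
  | case2 s h ih =>
    rw [rowsF, if_neg h, loopB]
    simp only [List.foldl_cons]
    rw [if_neg h, nextRowB_eq]
    exact ih _

theorem rowsF_length (s : List Char) : (rowsF s).length = max 1 s.length := by
  induction s using rowsF.induct with
  | case1 s h => rw [rowsF, if_pos h]; simp; omega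
  | case2 s h ih =>
    rw [rowsF, if_neg h]
    simp only [List.length_cons, ih, length_nextRowA]
    omega

theorem rowsF_mem_length (s : List Char) (r : List Char) (h : r ∈ rowsF s) :
    r.length ≤ s.length := by
  induction s using rowsF.induct with
  | case1 s h1 =>
    rw [rowsF, if_pos h1] at h
    simp at h; simp [h]
  | case2 s h1 ih =>
    rw [rowsF, if_neg h1] at h
    rcases List.mem_cons.mp h with h2 | h2
    · simp [h2]
    · have := ih h2
      rw [length_nextRowA] at this
      omega

theorem foldl_set_length (ps : List (Char × Nat)) (lines : List (List Char)) :
    (ps.foldl (fun ls p => ls.set p.2 (ls.getD p.2 [] ++ [p.1])) lines).length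
      = lines.length := by
  induction ps generalizing lines with
  | nil => rfl
  | cons p ps ih => rw [List.foldl_cons, ih]; simp

theorem scatterB_length (lines : List (List Char)) (row : List Char) :
    (scatterB lines row).length = lines.length := by
  unfold scatterB; exact foldl_set_length _ _

theorem scatter_aux (row : List Char) (k : Nat) (lines : List (List Char))
    (h : k + row.length ≤ lines.length) (c : Nat) :
    ((row.zipIdx k).foldl (fun ls p => ls.set p.2 (ls.getD p.2 [] ++ [p.1])) lines).getD c []
      = lines.getD c [] ++ (if c < k then [] else (row[(c - k)]?).toList) := by
  induction row generalizing k lines with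
  | nil => simp
  | cons a row ih =>
    simp only [List.zipIdx_cons, List.foldl_cons]
    have hk : k < lines.length := by simp at h; omega
    rw [ih (k + 1) (lines.set k (lines.getD k [] ++ [a]))
        (by rw [List.length_set]; simp at h ⊢; omega)]
    by_cases hck : c = k
    · subst hck
      rw [if_pos (by omega)]
      rw [List.getD_eq_getElem?_getD, List.getElem?_set_self (by omega),
          List.getD_eq_getElem?_getD (l := lines)]
      simp
    · rw [List.getD_eq_getElem?_getD, List.getElem?_set_ne (by omega),
          ← List.getD_eq_getElem?_getD]
      by_cases hlt : c < k
      · rw [if_pos (by omega), if_pos hlt]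
      · rw [if_neg (by omega), if_neg hlt]
        have : c - k = (c - (k + 1)) + 1 := by omega
        rw [this, List.getElem?_cons_succ]

theorem scatterB_getD (lines : List (List Char)) (row : List Char)
    (h : row.length ≤ lines.length) (c : Nat) :
    (scatterB lines row).getD c [] = lines.getD c [] ++ (row[c]?).toList := by
  unfold scatterB
  rw [scatter_aux row 0 lines (by omega) c]
  simp

theorem foldl_scatterB_getD (rows : List (List Char)) (lines : List (List Char))
    (h : ∀ r ∈ rows, r.length ≤ lines.length) (c : Nat) :
    (rows.foldl scatterB lines).getD c []
      = lines.getD c [] ++ (rows.map (fun r => (r[c]?).toList)).flatten := by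
  induction rows generalizing lines with
  | nil => simp
  | cons r rows ih =>
    rw [List.foldl_cons, ih _ (by intro q hq; rw [scatterB_length]; exact h q (by simp [hq]))]
    rw [scatterB_getD lines r (h r (by simp)) c]
    simp [List.append_assoc]

theorem diag_eq (s : List Char) (count : Nat) (hc : count < s.length) :
    (List.range ((rowsF s).length - count)).map
        (fun i => ((rowsF s).getD i []).getD count ' ')
      = ((rowsF s).map (fun r => (r[count]?).toList)).flatten := by
  induction s using rowsF.induct generalizing count with
  | case1 s h =>
    rw [rowsF, if_pos h]
    have h1 : s.length = 1 := by omega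
    have hc0 : count = 0 := by omega
    subst hc0
    simp [List.getElem?_eq_getElem (by omega : 0 < s.length)]
  | case2 s h ih =>
    rw [rowsF, if_neg h]
    have hlen' : (rowsF (nextRowA s)).length = s.length - 1 := by
      rw [rowsF_length, length_nextRowA]; omega
    have hlen : (s :: rowsF (nextRowA s)).length - count = (s.length - count - 1) + 1 := by
      simp [hlen']; omega
    rw [hlen, List.range_succ_eq_map, List.map_cons, List.map_map]
    simp only [List.map_cons, List.flatten_cons, List.getD_cons_zero,
      List.getElem?_eq_getElem (show count < s.length from hc), Option.toList_some]
    rw [List.getD_eq_getElem s ' ' hc]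
    simp only [List.singleton_append, List.cons.injEq, true_and]
    by_cases hce : count < s.length - 1
    · have := ih count (by rw [length_nextRowA]; omega)
      rw [show s.length - count - 1 = (rowsF (nextRowA s)).length - count from by omega] at *
      rw [← this]
      apply List.map_congr_left
      intro i _
      simp
    · have hz : s.length - count - 1 = 0 := by omega
      rw [hz]
      simp only [List.range_zero, List.map_nil]
      symm
      rw [List.flatten_eq_nil_iff]
      intro l hl
      rcases List.mem_map.mp hl with ⟨r, hr, rfl⟩
      have := rowsF_mem_length (nextRowA s) r hr
      rw [length_nextRowA] at this
      rw [List.getElem?_eq_none (by omega)]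
      rfl

-- ===== VERDICT (by name: the statement is the Claim_ definition above) =====
theorem steinhausGenerator_spec : Claim_equal_steinhausGenerator := by
  intro string _
  unfold Spec_steinhausGenerator
  simp only [steinhausGenerator, steinhausGenerator_alt]
  apply congrArg
  generalize string.toList = s
  rw [rowsA_eq, loopB_eq]
  have hhead : (rowsF s).headD [] = s := by rw [rowsF]; split <;> rfl
  rw [hhead]
  have hmem : ∀ r ∈ rowsF s, r.length ≤ (List.replicate s.length ([] : List Char)).length := by
    intro r hr; rw [List.length_replicate]; exact rowsF_mem_length s r hr
  -- the inner gather fold is a map; for count < |s| it equals the scattered diagonal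
  have htl : ∀ count, (List.range ((rowsF s).length - count)).foldl
        (fun newString i => newString ++ [((rowsF s).getD i []).getD count ' ']) []
      = (List.range ((rowsF s).length - count)).map
        (fun i => ((rowsF s).getD i []).getD count ' ') := by
    intro count
    rw [PySem.List.foldl_append_singleton_eq_map]
    simp
  simp only [htl]
  set TL := (List.range s.length).map (fun count =>
    (List.range ((rowsF s).length - count)).map
      (fun i => ((rowsF s).getD i []).getD count ' ')) with hTL
  have hTLlen : TL.length = s.length := by simp [hTL]
  have hTLgetD : ∀ i, i < s.length → TL.getD i []
      = (List.range ((rowsF s).length - i)).map (fun j => ((rowsF s).getD j []).getD i ' ') := by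
    intro i hi
    rw [hTL, List.getD_eq_getElem?_getD, List.getElem?_map, List.getElem?_range hi]
    rfl
  have hTLgetDlen : ∀ i, i < s.length → (TL.getD i []).length = s.length - i := by
    intro i hi
    rw [hTLgetD i hi, List.length_map, List.length_range, rowsF_length]
    omega
  have hlines : ∀ c, ((rowsF s).foldl scatterB (List.replicate s.length [])).getD c []
      = ((rowsF s).map (fun r => (r[c]?).toList)).flatten := by
    intro c
    rw [foldl_scatterB_getD _ _ hmem c]
    simp [List.getD_eq_getElem?_getD]
  -- turn A's output fold into a flatMap
  rw [show (fun (acc : List Char) i =>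
        acc ++ (List.replicate (TL.length - (TL.getD i []).length) '*' ++ ['*']
                ++ TL.getD i []) ++ ['\n'])
      = (fun acc i => acc ++ ((List.replicate (TL.length - (TL.getD i []).length) '*' ++ ['*']
                ++ TL.getD i []) ++ ['\n'])) from by
    funext acc i; rw [List.append_assoc]]
  rw [PySem.List.foldl_append_eq_flatMap, List.flatMap_def, List.nil_append, hTLlen]
  -- footer
  rw [show List.replicate (s.length + 1) '*' = '*' :: List.replicate s.length '*' from rfl]
  rw [List.append_assoc]
  apply congrArg₂ _ _ rfl
  apply congrArg
  apply List.map_congr_left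
  intro i hi
  have hi' : i < s.length := List.mem_range.mp hi
  rw [hTLgetDlen i hi', hlines i, hTLgetD i hi', diag_eq s i hi']
  rw [show s.length - (s.length - i) = i from by omega]
  rw [show List.replicate (i + 1) '*' = List.replicate i '*' ++ ['*'] from by
    simp [List.replicate_succ']]
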